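-- pv_equiv track=rewrite | github.com/AngeloFerrando/RationalMonitors | rational_multi_monitors.py | generate_pairings
-- ===== SOURCE A (Python) =====
-- def generate_pairings(lists_of_lists):
--     # Helper function to generate all unique pairs between two lists
--     def get_pairs(lists):
--         pairs = []
--         for i, lst1 in enumerate(lists):
--             for j, lst2 in enumerate(lists):
--                 if i < j:  # Avoid duplicates (unordered pairs)
--                     for a in lst1:
--                         for b in lst2:
--                             pair = (a, b) if a < b else (b, a)
--                             pairs.append(pair)
--         return pairs
--
--     # Recursive backtracking function to generate all valid combinations of pairs
--     def backtrack(current_pairs, remaining_items):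
--         # Add current combination to results
--         result.append(current_pairs.copy())
--
--         # Try to add more pairs if possible
--         for pair in pairs:
--             if pair[0] in remaining_items and pair[1] in remaining_items:
--                 # Remove the paired elements from remaining items
--                 remaining_items_copy = remaining_items.copy()
--                 remaining_items_copy.remove(pair[0])
--                 if pair[1] in remaining_items_copy:
--                     remaining_items_copy.remove(pair[1])
--
--                 # Add the pair and recurse
--                 current_pairs.append(pair)
--                 backtrack(current_pairs, remaining_items_copy)
--
--                 # Backtrack by removing the last added pair
--                 current_pairs.pop()
--
--     # Step 1: Generate all pairs from the lists
--     pairs = get_pairs(lists_of_lists)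
--
--     # Step 2: Backtrack to generate all valid combinations of pairs
--     result = []
--     all_items = set(item for sublist in lists_of_lists for item in sublist)
--
--     backtrack([], all_items)
--
--     return result
-- ===== SOURCE B (Python) =====
-- def generate_pairings(lists_of_lists):
--     # All cross-list pairs, normalised to (min, max), in the same order as the nested index loops.
--     pairs = [(a, b) if a < b else (b, a)
--              for idx, lst1 in enumerate(lists_of_lists)
--              for lst2 in lists_of_lists[idx + 1:]
--              for a in lst1
--              for b in lst2]
--
--     all_items = set(item for sublist in lists_of_lists for item in sublist)
--
--     # Pure recursion: the pairings extending the current node, in pre-order.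
--     def extensions(remaining):
--         return [[]] + [[pair] + tail
--                        for pair in pairs
--                        if pair[0] in remaining and pair[1] in remaining
--                        for tail in extensions(remaining - {pair[0], pair[1]})]
--
--     return extensions(all_items)
-- ===== Notes on version B (the rewrite author's own statement) =====
-- stated objective: simpler
-- what changed: A's recursive backtracking with a mutated current_pairs list and a global result accumulator is replaced by a pure recursion that returns, for each remaining-items set, the list of all pair sequences directly ([[]] plus, per usable pair, the pair consed onto each recursive tail), with the pairs list built by a comprehension over list suffixes instead of index-guarded nested loops.
import Mathlib
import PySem

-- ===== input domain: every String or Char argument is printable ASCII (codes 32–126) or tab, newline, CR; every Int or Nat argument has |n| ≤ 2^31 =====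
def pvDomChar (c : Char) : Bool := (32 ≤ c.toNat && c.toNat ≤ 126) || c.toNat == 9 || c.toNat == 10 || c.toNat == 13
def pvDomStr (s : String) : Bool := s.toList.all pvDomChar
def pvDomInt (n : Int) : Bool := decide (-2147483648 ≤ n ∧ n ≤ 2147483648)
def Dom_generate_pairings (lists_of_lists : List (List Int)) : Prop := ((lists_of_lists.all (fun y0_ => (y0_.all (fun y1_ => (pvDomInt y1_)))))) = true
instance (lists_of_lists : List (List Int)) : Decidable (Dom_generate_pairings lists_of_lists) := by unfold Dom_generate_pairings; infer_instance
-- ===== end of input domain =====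

-- B replaces A's mutating backtracking (global result list, append/pop of current_pairs) with a pure recursion returning the pairings directly (objective: simpler).


-- termination helpers for the two recursions (cited by decreasing_by)
theorem pvFilterLen_lt (q : Int → Bool) (s : List Int) (x : Int) (hx : x ∈ s) (hq : q x = false) :
    (s.filter q).length < s.length := by
  induction s with
  | nil => cases hx
  | cons y ys ih =>
    rw [List.filter_cons]
    rcases List.mem_cons.mp hx with rfl | hmem
    · rw [hq]
      simpa using Nat.lt_succ_of_le (List.length_filter_le q ys)
    · have := ih hmem
      split
      · simpa using Nat.succ_lt_succ this
      · exact Nat.lt_succ_of_lt this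

theorem pvOfListPair_contains_left (p1 p2 : Int) :
    (PySem.Set.ofList [p1, p2]).contains p1 = true := by
  by_cases hab : p1 = p2 <;>
    simp [PySem.Set.ofList, PySem.Set.add, PySem.Set.empty, PySem.Set.contains, hab] <;>
    split <;> simp

theorem pvDiffPairLen_lt (remaining : PySem.Set Int) (a b : Int)
    (h : PySem.Set.contains remaining a = true) :
    (PySem.Set.diff remaining (PySem.Set.ofList [a, b])).length < remaining.length := by
  have hmem : a ∈ remaining := by simpa [PySem.Set.contains] using h
  have hq : (fun x => !(PySem.Set.ofList [a, b]).contains x) a = false := by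
    rw [Bool.not_eq_false', pvOfListPair_contains_left a b]
  simpa [PySem.Set.diff] using
    pvFilterLen_lt (fun x => !(PySem.Set.ofList [a, b]).contains x) remaining a hmem hq

-- ===== PORT A =====
-- get_pairs: the four nested loops, appending one normalised pair at a time
def pvGetPairs (lists : List (List Int)) : List (Int × Int) :=
  (PySem.List.enumerate lists).foldl (fun pairs il1 =>
    (PySem.List.enumerate lists).foldl (fun pairs jl2 =>
      if il1.1 < jl2.1 then
        il1.2.foldl (fun pairs a =>
          jl2.2.foldl (fun pairs b =>
            pairs ++ [if a < b then (a, b) else (b, a)]) pairs) pairs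
      else pairs) pairs) []

-- backtrack: the `for pair in pairs` loop (ps is the tail still to scan); the
-- `result.append(current_pairs.copy())` performed on entering a node appears at
-- the two call sites of a node (the initial call and the recursive call).
-- `remaining_items_copy.remove(pair[0])` is ported as Set.discard, exact here
-- because the membership guard has just checked pair[0] ∈ remaining.
def pvBacktrack (pairs ps : List (Int × Int)) (current : List (Int × Int))
    (remaining : PySem.Set Int) (result : List (List (Int × Int))) :
    List (List (Int × Int)) :=
  match ps with
  | [] => result
  | p :: rest =>
    if h : (PySem.Set.contains remaining p.1 && PySem.Set.contains remaining p.2) = true then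
      let rem1 := PySem.Set.discard remaining p.1
      let rem2 := if PySem.Set.contains rem1 p.2 then PySem.Set.discard rem1 p.2 else rem1
      pvBacktrack pairs rest current remaining
        (pvBacktrack pairs pairs (current ++ [p]) rem2 (result ++ [current ++ [p]]))
    else
      pvBacktrack pairs rest current remaining result
termination_by (remaining.length, ps.length)
decreasing_by
  · apply Prod.Lex.left
    simp only [Bool.and_eq_true] at h
    have hmem : p.1 ∈ remaining := by simpa [PySem.Set.contains] using h.1
    have h1 : (PySem.Set.discard remaining p.1).length < remaining.length := by
      simpa [PySem.Set.discard] using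
        pvFilterLen_lt (fun y => !y == p.1) remaining p.1 hmem (by simp)
    have h2 : (PySem.Set.discard (PySem.Set.discard remaining p.1) p.2).length
        ≤ (PySem.Set.discard remaining p.1).length := by
      simpa [PySem.Set.discard] using List.length_filter_le _ (PySem.Set.discard remaining p.1)
    split <;> omega
  · apply Prod.Lex.right; simp
  · apply Prod.Lex.right; simp

def generate_pairings (lists_of_lists : List (List Int)) : List (List (Int × Int)) :=
  let pairs := pvGetPairs lists_of_lists
  let all_items : PySem.Set Int :=
    PySem.Set.ofList (lists_of_lists.flatMap (fun sublist => sublist))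
  -- backtrack([], all_items) with result = []: append current = [] then run the loop
  pvBacktrack pairs pairs [] all_items ([] ++ [[]])

-- ===== PORT B =====
-- the pairs comprehension: each list against the lists after it (a slice)
def pvPairsB (lists : List (List Int)) : List (Int × Int) :=
  (PySem.List.enumerate lists).flatMap (fun il =>
    (PySem.List.slice lists (some (il.1 + 1)) none).flatMap (fun lst2 =>
      il.2.flatMap (fun a => lst2.map (fun b => if a < b then (a, b) else (b, a)))))

-- extensions(remaining): [[]] plus, per usable pair, that pair consed onto each recursive tail
def pvExtensions (pairs : List (Int × Int)) (remaining : PySem.Set Int) :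
    List (List (Int × Int)) :=
  [[]] ++ pairs.flatMap (fun p =>
    if h : (PySem.Set.contains remaining p.1 && PySem.Set.contains remaining p.2) = true then
      (pvExtensions pairs
        (PySem.Set.diff remaining (PySem.Set.ofList [p.1, p.2]))).map (fun tail => p :: tail)
    else [])
termination_by remaining.length
decreasing_by
  simp only [Bool.and_eq_true] at h
  exact pvDiffPairLen_lt remaining p.1 p.2 h.1

def generate_pairings_alt (lists_of_lists : List (List Int)) : List (List (Int × Int)) :=
  let pairs := pvPairsB lists_of_lists
  let all_items : PySem.Set Int :=
    PySem.Set.ofList (lists_of_lists.flatMap (fun sublist => sublist))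
  pvExtensions pairs all_items

-- ===== PRECONDITION & SPEC =====
def Spec_generate_pairings (lists_of_lists : List (List Int)) (out : List (List (Int × Int))) : Prop := out = generate_pairings_alt lists_of_lists
instance (lists_of_lists : List (List Int)) (out : List (List (Int × Int))) : Decidable (Spec_generate_pairings lists_of_lists out) := by unfold Spec_generate_pairings; infer_instance

-- ===== CLAIM (what is proved, stated in full; the proofs are below) =====
def Claim_equal_generate_pairings : Prop := ∀ (lists_of_lists : List (List Int)), Dom_generate_pairings lists_of_lists → Spec_generate_pairings lists_of_lists (generate_pairings lists_of_lists)

-- ===== LEMMAS AND PROOFS =====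

-- the per-pair contribution of a node of B's recursion
def pvG (pairs : List (Int × Int)) (remaining : PySem.Set Int) (p : Int × Int) :
    List (List (Int × Int)) :=
  if (PySem.Set.contains remaining p.1 && PySem.Set.contains remaining p.2) = true then
    (pvExtensions pairs
      (PySem.Set.diff remaining (PySem.Set.ofList [p.1, p.2]))).map (fun tail => p :: tail)
  else []

theorem pvExtensions_eq (pairs : List (Int × Int)) (remaining : PySem.Set Int) :
    pvExtensions pairs remaining = [[]] ++ pairs.flatMap (pvG pairs remaining) := by
  rw [pvExtensions]
  simp only [dite_eq_ite]
  rfl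

theorem pvOfListPair_contains (a b x : Int) :
    (PySem.Set.ofList [a, b]).contains x = (x == a || x == b) := by
  rw [Bool.eq_iff_iff]
  simp only [PySem.Set.ofList, PySem.Set.add, PySem.Set.empty, PySem.Set.contains]
  by_cases hab : b = a <;> simp [hab]

-- A's two-step removal equals B's set difference
theorem pvRem2_eq (remaining : PySem.Set Int) (p : Int × Int) :
    (if PySem.Set.contains (PySem.Set.discard remaining p.1) p.2
      then PySem.Set.discard (PySem.Set.discard remaining p.1) p.2
      else PySem.Set.discard remaining p.1)
    = PySem.Set.diff remaining (PySem.Set.ofList [p.1, p.2]) := by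
  have hdd : PySem.Set.discard (PySem.Set.discard remaining p.1) p.2
      = PySem.Set.diff remaining (PySem.Set.ofList [p.1, p.2]) := by
    simp only [PySem.Set.discard, PySem.Set.diff, List.filter_filter]
    apply List.filter_congr
    intro x _
    rw [pvOfListPair_contains]
    by_cases h1 : x = p.1 <;> by_cases h2 : x = p.2 <;> simp [h1, h2, Bool.and_comm]
  split
  · exact hdd
  · rename_i hno
    rw [← hdd]
    refine (List.filter_eq_self.mpr ?_).symm
    intro y hy
    have hne : y ≠ p.2 := by
      rintro rfl
      exact hno (by simpa [PySem.Set.contains] using hy)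
    simp [hne]

-- flattening A's nested foldl loops
theorem pvFoldlIf {α β : Type} (p : α → Prop) [DecidablePred p] (g : α → List β)
    (l : List α) (acc : List β) :
    l.foldl (fun acc x => if p x then acc ++ g x else acc) acc
      = acc ++ l.flatMap (fun x => if p x then g x else []) := by
  have hfun : (fun (acc : List β) x => if p x then acc ++ g x else acc)
      = fun acc x => acc ++ (if p x then g x else []) := by
    funext acc x; split <;> simp
  rw [hfun, PySem.List.foldl_append_eq_flatMap]

theorem pvGetPairs_flat (lists : List (List Int)) :
    pvGetPairs lists = (PySem.List.enumerate lists).flatMap (fun il =>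
      (PySem.List.enumerate lists).flatMap (fun jl =>
        if il.1 < jl.1 then
          il.2.flatMap (fun a => jl.2.map (fun b => if a < b then (a, b) else (b, a)))
        else [])) := by
  unfold pvGetPairs
  simp only [PySem.List.foldl_append_singleton_eq_map, PySem.List.foldl_append_eq_flatMap,
    pvFoldlIf, List.nil_append]

-- indices greater than k in an enumeration are exactly the dropped suffix
theorem pvEnumDrop (Y : List Int) (lists : List (List Int)) :
    ∀ (s k : Int),
    (PySem.List.enumerate lists s).flatMap (fun jl =>
        if k < jl.1 then Y.flatMap (fun a => jl.2.map (fun b => if a < b then (a, b) else (b, a)))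
        else [])
      = (lists.drop (k + 1 - s).toNat).flatMap (fun lst2 =>
          Y.flatMap (fun a => lst2.map (fun b => if a < b then (a, b) else (b, a)))) := by
  induction lists with
  | nil => intro s k; simp [PySem.List.enumerate]
  | cons x xs ih =>
    intro s k
    rw [PySem.List.enumerate_cons]
    simp only [List.flatMap_cons]
    rw [ih (s + 1) k]
    by_cases h : k < s
    · have h1 : (k + 1 - s).toNat = 0 := by omega
      have h2 : (k - s).toNat = 0 := by omega
      simp [h1, h2, h]
    · have h1 : (k + 1 - s).toNat = (k - s).toNat + 1 := by omega
      simp [h1, h]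

theorem pvPairs_eq (lists : List (List Int)) : pvGetPairs lists = pvPairsB lists := by
  rw [pvGetPairs_flat]
  unfold pvPairsB
  apply List.flatMap_congr
  intro il hil
  obtain ⟨k, hk, rfl⟩ := (PySem.List.mem_enumerate_iff lists 0 il).mp hil
  simp only
  rw [pvEnumDrop lists[k] lists 0 (0 + (k : Int))]
  have hcast : ((0 : Int) + (k : Int) + 1) = ((k + 1 : Nat) : Int) := by push_cast; ring
  rw [hcast, PySem.List.slice_from_natCast]
  congr 1

-- A's loop is B's flatMap, offset by the accumulated result and current prefix
theorem pvBacktrack_eq : ∀ (n : Nat) (pairs : List (Int × Int)) (remaining : PySem.Set Int),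
    remaining.length ≤ n → ∀ ps current result,
    pvBacktrack pairs ps current remaining result
      = result ++ (ps.flatMap (pvG pairs remaining)).map (fun t => current ++ t) := by
  intro n
  induction n with
  | zero =>
    intro pairs remaining hn ps current result
    have hrem : remaining = [] := List.eq_nil_of_length_eq_zero (Nat.le_zero.mp hn)
    subst hrem
    induction ps generalizing result with
    | nil => rw [pvBacktrack]; simp
    | cons p rest ihps =>
      rw [pvBacktrack]
      rw [dif_neg (by simp [PySem.Set.contains])]
      rw [ihps]
      simp [pvG, PySem.Set.contains]
  | succ n ihn =>
    intro pairs remaining hn ps current result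
    induction ps generalizing result with
    | nil => rw [pvBacktrack]; simp
    | cons p rest ihps =>
      rw [pvBacktrack]
      by_cases h : (PySem.Set.contains remaining p.1 && PySem.Set.contains remaining p.2) = true
      · rw [dif_pos h]
        simp only [pvRem2_eq remaining p]
        have hlt : (PySem.Set.diff remaining (PySem.Set.ofList [p.1, p.2])).length ≤ n := by
          have := pvDiffPairLen_lt remaining p.1 p.2 (by simp_all)
          omega
        rw [ihn pairs _ hlt pairs (current ++ [p]) (result ++ [current ++ [p]])]
        rw [ihps]
        simp only [List.flatMap_cons, List.map_append, List.append_assoc]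
        congr 1
        rw [pvG, if_pos h, pvExtensions_eq]
        simp [List.map_map, Function.comp_def]
      · rw [dif_neg h]
        rw [ihps]
        have hg : pvG pairs remaining p = [] := by rw [pvG, if_neg h]
        simp [hg]

-- ===== VERDICT (by name: the statement is the Claim_ definition above) =====
theorem generate_pairings_spec : Claim_equal_generate_pairings := by
  intro l _
  unfold Spec_generate_pairings generate_pairings generate_pairings_alt
  rw [pvPairs_eq]
  rw [pvBacktrack_eq (PySem.Set.ofList (l.flatMap (fun sublist => sublist))).length
    (pvPairsB l) _ le_rfl]
  rw [pvExtensions_eq]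
  simp
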